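-- pv_equiv track=rewrite | github.com/kochkozharov/dm-kursa4 | grundy/grundy.py | graph_cores
-- ===== SOURCE A (Python) =====
-- from itertools import product
--
-- def graph_cores(m):
--     n = len(m)
--     cnf1 = []
--     for i in range(n):
--         for j in range(n):
--             if m[i][j] == 1:
--                 cnf1.append((i,j))
--
--     cnf2 = []
--     for i in range(n):
--         dis = [i]
--         for j in range(n):
--             if m[i][j] == 1:
--                 dis.append(j)
--         cnf2.append(dis)
--
--     cores = []
--
--     for line in product([0,1], repeat=n):
--         res = True
--         for dis in cnf1:
--             res = res and (not line[dis[0]] or not line[dis[1]])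
--         for dis in cnf2:
--             res = res and any(line[i] for i in dis)
--         if res == True:
--             cores.append(line)
--
--     for i in range(len(cores)):
--         cores[i] = [j for j,v in enumerate(cores[i]) if v==1]
--     return cores
-- ===== SOURCE B (Python) =====
-- def graph_cores(m):
--     n = len(m)
--     # self-loop flags, symmetric neighbourhoods (independence), closed neighbourhoods (domination)
--     loop = [m[k][k] == 1 for k in range(n)]
--     unbr = [{j for j in range(n) if m[k][j] == 1 or m[j][k] == 1} for k in range(n)]
--     cl = [[i] + [j for j in range(n) if m[i][j] == 1] for i in range(n)]
--     # vertex i must be dominated no later than layer max(cl[i]): group the clauses by that layer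
--     stage = [[set(cl[i]) for i in range(n) if max(cl[i]) == k] for k in range(n)]
--     # layered backtracking: cur = independent, not-yet-undominatable subsets of {0..k-1},
--     # visited in the order product([0,1], repeat=n) would produce them
--     cur = [[]]
--     for k in range(n):
--         nxt = []
--         for s in cur:
--             nxt.append(s)
--             if not loop[k] and unbr[k].isdisjoint(s):
--                 nxt.append(s + [k])
--         if stage[k]:
--             cur = [t for t in nxt if all(not c.isdisjoint(t) for c in stage[k])]
--         else:
--             cur = nxt
--     return cur
-- ===== Notes on version B (the rewrite author's own statement) =====
-- stated objective: faster
-- what changed: B replaces A's scan of all 2^n bit vectors (each checked against every edge and domination clause) by layered backtracking that extends partial sets vertex by vertex, pruning both on independence violations and on vertices whose whole closed neighbourhood is already decided but unpicked, visiting survivors in exactly product([0,1], repeat=n) order.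
import Mathlib
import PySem

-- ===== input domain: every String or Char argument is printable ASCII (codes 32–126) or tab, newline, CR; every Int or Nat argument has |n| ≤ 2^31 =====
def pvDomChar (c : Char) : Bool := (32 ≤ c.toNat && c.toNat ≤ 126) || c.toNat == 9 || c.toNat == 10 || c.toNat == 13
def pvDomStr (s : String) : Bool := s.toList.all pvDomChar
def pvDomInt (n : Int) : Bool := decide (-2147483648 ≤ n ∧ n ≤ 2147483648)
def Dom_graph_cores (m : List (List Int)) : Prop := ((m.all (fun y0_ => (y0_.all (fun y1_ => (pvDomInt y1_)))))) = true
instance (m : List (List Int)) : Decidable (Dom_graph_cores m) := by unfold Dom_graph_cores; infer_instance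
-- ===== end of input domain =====

-- B replaces A's scan of all 2^n bit vectors by layered backtracking over partial sets,
-- pruning on independence violations and on vertices that can no longer be dominated
-- (objective: faster; a timing run measures the speed-up).

-- ===== PORT A =====
-- itertools.product([0,1], repeat=n), in product's order (last coordinate fastest)
def pvProd01 : Nat → List (List Int)
  | 0 => [[]]
  | n+1 => (pvProd01 n).flatMap (fun l => [l ++ [0], l ++ [1]])

def graph_cores (m : List (List Int)) : List (List Int) :=
  let n := m.length
  let cnf1 : List (Nat × Nat) := (List.range n).flatMap (fun i =>
    (List.range n).filterMap (fun j =>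
      if (m.getD i []).getD j 0 == 1 then some (i, j) else none))
  let cnf2 : List (List Nat) := (List.range n).map (fun i =>
    i :: (List.range n).filterMap (fun j =>
      if (m.getD i []).getD j 0 == 1 then some j else none))
  let cores := (pvProd01 n).foldl (fun acc line =>
    let res := cnf1.foldl (fun r d =>
      r && ((line.getD d.1 0 == 0) || (line.getD d.2 0 == 0))) true
    let res := cnf2.foldl (fun r dis =>
      r && dis.any (fun i => !(line.getD i 0 == 0))) res
    if res == true then acc ++ [line] else acc) []
  cores.map (fun line => (PySem.List.enumerate line 0).filterMap
    (fun p => if p.2 == 1 then some p.1 else none))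

-- ===== PORT B =====
def graph_cores_alt (m : List (List Int)) : List (List Int) :=
  let n := m.length
  let loop := (List.range n).map (fun k => (m.getD k []).getD k 0 == 1)
  let unbr := (List.range n).map (fun k => (List.range n).filterMap
      (fun j => if ((m.getD k []).getD j 0 == 1 || (m.getD j []).getD k 0 == 1)
        then some j else none))
  let cl := (List.range n).map (fun i => i :: (List.range n).filterMap
      (fun j => if (m.getD i []).getD j 0 == 1 then some j else none))
  let stage := (List.range n).map (fun k => (List.range n).filterMap
      (fun i => if (cl.getD i []).max? == some k then some (cl.getD i []) else none))
  let cur := (List.range n).foldl (fun cur k =>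
    let nxt := cur.foldl (fun nxt s =>
      nxt ++ (s :: (if !(loop.getD k false)
          && (s.all (fun j => !((unbr.getD k []).contains j)))
        then [s ++ [k]] else []))) []
    if (stage.getD k []).isEmpty then nxt
    else nxt.filter (fun t => (stage.getD k []).all (fun c => c.any (fun x => t.contains x)))) [[]]
  cur.map (fun s => s.map Int.ofNat)

-- ===== PRECONDITION & SPEC =====
-- Pre_ excludes exactly the inputs where Python A raises IndexError: some row shorter
-- than the number of rows (m[i][j] is read for all i, j < len(m)).
def Pre_graph_cores (m : List (List Int)) : Prop :=
  ∀ row ∈ m, m.length ≤ row.length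
instance (m : List (List Int)) : Decidable (Pre_graph_cores m) := by
  unfold Pre_graph_cores; infer_instance

def pvWitness_graph_cores : List (List Int) := [[0, 1], [1, 0]]

def Spec_graph_cores (m : List (List Int)) (out : List (List Int)) : Prop := out = graph_cores_alt m
instance (m : List (List Int)) (out : List (List Int)) : Decidable (Spec_graph_cores m out) := by unfold Spec_graph_cores; infer_instance

-- ===== CLAIM (what is proved, stated in full; the proofs are below) =====
def Claim_equal_graph_cores : Prop := ∀ (m : List (List Int)), Dom_graph_cores m → Pre_graph_cores m → Spec_graph_cores m (graph_cores m)

-- ===== LEMMAS AND PROOFS =====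

-- entry test used everywhere
def pvM (m : List (List Int)) (i j : Nat) : Int := (m.getD i []).getD j 0

-- named pieces of B (definitionally the port's let-bound lists, pointwise)
def nb (m : List (List Int)) (i : Nat) : List Nat :=
  (List.range m.length).filterMap
    (fun j => if (m.getD i []).getD j 0 == 1 then some j else none)

def clF (m : List (List Int)) (i : Nat) : List Nat := i :: nb m i

def unbrF (m : List (List Int)) (k : Nat) : List Nat :=
  (List.range m.length).filterMap
    (fun j => if ((m.getD k []).getD j 0 == 1 || (m.getD j []).getD k 0 == 1)
      then some j else none)

def altOk (m : List (List Int)) (k : Nat) (s : List Nat) : Bool :=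
  !((m.getD k []).getD k 0 == 1) && (s.all (fun j => !((unbrF m k).contains j)))

def stageF (m : List (List Int)) (k : Nat) : List (List Nat) :=
  (List.range m.length).filterMap
    (fun i => if (((List.range m.length).map (clF m)).getD i []).max? == some k
      then some (((List.range m.length).map (clF m)).getD i []) else none)

def stageOK (m : List (List Int)) (k : Nat) (t : List Nat) : Bool :=
  (stageF m k).all (fun c => c.any (fun x => t.contains x))

def stepB (m : List (List Int)) (cur : List (List Nat)) (k : Nat) : List (List Nat) :=
  (cur.flatMap (fun s => s :: (if altOk m k s then [s ++ [k]] else []))).filter (stageOK m k)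

-- B's layered pass applied to one product line, left to right
def selOf? (m : List (List Int)) : List Nat → Nat → List Int → Option (List Nat)
  | sel, _, [] => some sel
  | sel, k, b :: l =>
    if b == 1 then
      if altOk m k sel then
        (if stageOK m k (sel ++ [k]) then selOf? m (sel ++ [k]) (k+1) l else none)
      else none
    else
      (if stageOK m k sel then selOf? m sel (k+1) l else none)

-- selected (absolute) indices of a 0/1 line whose first cell has absolute index k
def picks : Nat → List Int → List Nat
  | _, [] => []
  | k, b :: l => if b == 1 then k :: picks (k+1) l else picks (k+1) l

theorem prod01_mem {n : Nat} {l : List Int} (h : l ∈ pvProd01 n) :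
    l.length = n ∧ ∀ b ∈ l, b = 0 ∨ b = 1 := by
  induction n generalizing l with
  | zero => simp [pvProd01] at h; simp [h]
  | succ n ih =>
    simp only [pvProd01, List.mem_flatMap] at h
    obtain ⟨l', hl', h⟩ := h
    obtain ⟨hlen, hb⟩ := ih hl'
    simp only [List.mem_cons] at h
    rcases h with rfl | h
    · constructor
      · simp [hlen]
      · intro b hb'; rcases List.mem_append.1 hb' with h | h
        · exact hb b h
        · simp at h; simp [h]
    · simp at h; subst h
      constructor
      · simp [hlen]
      · intro b hb'; rcases List.mem_append.1 hb' with h | h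
        · exact hb b h
        · simp at h; simp [h]

theorem selOf?_snoc (m : List (List Int)) (l : List Int) (b : Int) :
    ∀ (sel : List Nat) (k : Nat),
    selOf? m sel k (l ++ [b]) = (selOf? m sel k l).bind (fun s =>
      if b == 1 then
        (if altOk m (k + l.length) s then
          (if stageOK m (k + l.length) (s ++ [k + l.length]) then some (s ++ [k + l.length])
            else none)
          else none)
      else (if stageOK m (k + l.length) s then some s else none)) := by
  induction l with
  | nil =>
    intro sel k
    simp [selOf?]
  | cons c l ih =>
    intro sel k
    simp only [List.cons_append, selOf?]
    have he : k + 1 + l.length = k + (l.length + 1) := by omega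
    split
    · split
      · split
        · rw [ih, List.length_cons, ← he]
        · simp
      · simp
    · split
      · rw [ih, List.length_cons, ← he]
      · simp

theorem picks_ge {l : List Int} : ∀ {k a : Nat}, a ∈ picks k l → k ≤ a := by
  induction l with
  | nil => intro k a h; simp [picks] at h
  | cons b l ih =>
    intro k a h
    simp only [picks] at h
    split at h
    · rcases List.mem_cons.1 h with rfl | h
      · exact Nat.le_refl _
      · exact Nat.le_of_succ_le (ih h)
    · exact Nat.le_of_succ_le (ih h)

theorem mem_picks {l : List Int} : ∀ {k a : Nat},
    a ∈ picks k l ↔ (k ≤ a ∧ a - k < l.length ∧ l.getD (a - k) 0 = 1) := by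
  induction l with
  | nil => intro k a; simp [picks]
  | cons b l ih =>
    intro k a
    constructor
    · intro h
      simp only [picks] at h
      split at h
      case isTrue hb =>
        rcases List.mem_cons.1 h with rfl | h
        · refine ⟨Nat.le_refl _, by simp, ?_⟩
          simp at hb ⊢
          exact hb
        · have hka := picks_ge h
          obtain ⟨_, h2, h3⟩ := ih.1 h
          refine ⟨by omega, by simp; omega, ?_⟩
          rw [show a - k = (a - (k+1)) + 1 by omega]
          simpa using h3
      case isFalse hb =>
        have hka := picks_ge h
        obtain ⟨_, h2, h3⟩ := ih.1 h
        refine ⟨by omega, by simp; omega, ?_⟩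
        rw [show a - k = (a - (k+1)) + 1 by omega]
        simpa using h3
    · rintro ⟨hka, hlen, hget⟩
      simp only [picks]
      by_cases hak : a = k
      · subst hak
        simp only [Nat.sub_self] at hget
        simp at hget
        rw [if_pos (by simp [hget])]
        exact List.mem_cons_self ..
      · have hget' : l.getD (a - (k+1)) 0 = 1 := by
          rw [show a - k = (a - (k+1)) + 1 by omega] at hget
          simpa using hget
        have hmem : a ∈ picks (k+1) l := ih.2 ⟨by omega, by simp at hlen; omega, hget'⟩
        split
        · exact List.mem_cons_of_mem _ hmem
        · exact hmem

theorem picks_cons (k : Nat) (b : Int) (l : List Int) :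
    picks k (b :: l) = picks k [b] ++ picks (k+1) l := by
  simp only [picks]
  split <;> simp

-- B's incremental acceptance as a Bool predicate over the whole line
def okPrefix (m : List (List Int)) : List Nat → Nat → List Int → Bool
  | _, _, [] => true
  | sel, k, b :: l =>
    if b == 1 then
      altOk m k sel && (stageOK m k (sel ++ [k]) && okPrefix m (sel ++ [k]) (k+1) l)
    else stageOK m k sel && okPrefix m sel (k+1) l

-- its two components: independence checks and staged domination checks
def okPrefixI (m : List (List Int)) : List Nat → Nat → List Int → Bool
  | _, _, [] => true
  | sel, k, b :: l =>
    if b == 1 then altOk m k sel && okPrefixI m (sel ++ [k]) (k+1) l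
    else okPrefixI m sel (k+1) l

def domPrefix (m : List (List Int)) : List Nat → Nat → List Int → Bool
  | _, _, [] => true
  | sel, k, b :: l =>
    if b == 1 then stageOK m k (sel ++ [k]) && domPrefix m (sel ++ [k]) (k+1) l
    else stageOK m k sel && domPrefix m sel (k+1) l

theorem okPrefix_split (m : List (List Int)) (l : List Int) : ∀ (sel : List Nat) (k : Nat),
    okPrefix m sel k l = (okPrefixI m sel k l && domPrefix m sel k l) := by
  induction l with
  | nil => intro sel k; simp [okPrefix, okPrefixI, domPrefix]
  | cons b l ih =>
    intro sel k
    simp only [okPrefix, okPrefixI, domPrefix]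
    split
    · rw [ih]
      cases altOk m k sel <;> cases stageOK m k (sel ++ [k]) <;>
        cases okPrefixI m (sel ++ [k]) (k+1) l <;> simp
    · rw [ih]
      cases stageOK m k sel <;> cases okPrefixI m sel (k+1) l <;> simp

theorem selOf?_eq (m : List (List Int)) (l : List Int) : ∀ (sel : List Nat) (k : Nat),
    selOf? m sel k l = if okPrefix m sel k l then some (sel ++ picks k l) else none := by
  induction l with
  | nil => intro sel k; simp [selOf?, okPrefix, picks]
  | cons b l ih =>
    intro sel k
    simp only [selOf?, okPrefix, picks]
    split
    · by_cases hok : altOk m k sel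
      · rw [if_pos hok]
        by_cases hst : stageOK m k (sel ++ [k])
        · rw [if_pos hst, ih]
          simp [hok, hst]
        · simp [hok, hst]
      · simp [hok]
    · by_cases hst : stageOK m k sel
      · rw [if_pos hst, ih]
        simp [hst]
      · simp [hst]

-- membership facts about B's helper lists
theorem mem_nb {m : List (List Int)} {i t : Nat} :
    t ∈ nb m i ↔ (t < m.length ∧ (m.getD i []).getD t 0 = 1) := by
  unfold nb
  simp only [List.mem_filterMap, List.mem_range, Option.ite_none_right_eq_some,
    Option.some.injEq, beq_iff_eq]
  constructor
  · rintro ⟨j, hj, hM, rfl⟩; exact ⟨hj, hM⟩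
  · rintro ⟨ht, hM⟩; exact ⟨t, ht, hM, rfl⟩

theorem mem_unbrF {m : List (List Int)} {k t : Nat} :
    t ∈ unbrF m k ↔ (t < m.length ∧ ((m.getD k []).getD t 0 = 1 ∨ (m.getD t []).getD k 0 = 1)) := by
  unfold unbrF
  simp only [List.mem_filterMap, List.mem_range, Option.ite_none_right_eq_some,
    Option.some.injEq, Bool.or_eq_true, beq_iff_eq]
  constructor
  · rintro ⟨j, hj, hM, rfl⟩; exact ⟨hj, hM⟩
  · rintro ⟨ht, hM⟩; exact ⟨t, ht, hM, rfl⟩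

theorem altOk_iff {m : List (List Int)} {k : Nat} {sel : List Nat}
    (hsel : ∀ j ∈ sel, j < m.length) :
    altOk m k sel = true ↔
      (pvM m k k ≠ 1 ∧ ∀ j ∈ sel, pvM m k j ≠ 1 ∧ pvM m j k ≠ 1) := by
  unfold altOk
  simp only [Bool.and_eq_true, Bool.not_eq_true', beq_eq_false_iff_ne, ne_eq,
    List.all_eq_true, Bool.not_eq_eq_eq_not, Bool.not_true, List.contains_eq_mem,
    decide_eq_false_iff_not]
  constructor
  · rintro ⟨h1, h2⟩
    refine ⟨h1, ?_⟩
    intro j hj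
    constructor
    · intro hM; exact h2 j hj (mem_unbrF.2 ⟨hsel j hj, Or.inl hM⟩)
    · intro hM; exact h2 j hj (mem_unbrF.2 ⟨hsel j hj, Or.inr hM⟩)
  · rintro ⟨h1, h2⟩
    refine ⟨h1, ?_⟩
    intro j hj
    rw [mem_unbrF]
    rintro ⟨-, hM | hM⟩
    · exact (h2 j hj).1 hM
    · exact (h2 j hj).2 hM

-- the independence bridge: incremental checks ↔ global pairwise independence
theorem okPrefixI_iff (m : List (List Int)) (l : List Int) : ∀ (sel : List Nat) (k : Nat),
    (k + l.length ≤ m.length) → (∀ j ∈ sel, j < m.length) →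
    (okPrefixI m sel k l = true ↔
      ∀ a ∈ picks k l, pvM m a a ≠ 1 ∧
        ∀ j, (j ∈ sel ∨ (j ∈ picks k l ∧ j < a)) → pvM m a j ≠ 1 ∧ pvM m j a ≠ 1) := by
  induction l with
  | nil => intro sel k _ _; simp [okPrefixI, picks]
  | cons b l ih =>
    intro sel k hkl hsel
    have hkn : k < m.length := by simp at hkl; omega
    have hkl' : (k+1) + l.length ≤ m.length := by simp at hkl; omega
    simp only [okPrefixI, picks]
    split
    · -- b == 1 : picks = k :: picks (k+1) l
      have hsel' : ∀ j ∈ sel ++ [k], j < m.length := by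
        intro j hj
        rcases List.mem_append.1 hj with hj | hj
        · exact hsel j hj
        · simp at hj; omega
      rw [Bool.and_eq_true, ih (sel ++ [k]) (k+1) hkl' hsel']
      constructor
      · rintro ⟨hok, hrest⟩ a ha
        rcases List.mem_cons.1 ha with rfl | ha
        · obtain ⟨h1, h2⟩ := (altOk_iff hsel).1 hok
          refine ⟨h1, ?_⟩
          rintro j (hj | ⟨hj, hja⟩)
          · exact h2 j hj
          · rcases List.mem_cons.1 hj with rfl | hj
            · omega
            · exact absurd (picks_ge hj) (by omega)
        · have hka : k < a := picks_ge ha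
          obtain ⟨h1, h2⟩ := hrest a ha
          refine ⟨h1, ?_⟩
          rintro j (hj | ⟨hj, hja⟩)
          · exact h2 j (Or.inl (by simp [hj]))
          · rcases List.mem_cons.1 hj with rfl | hj
            · exact h2 j (Or.inl (by simp))
            · exact h2 j (Or.inr ⟨hj, hja⟩)
      · intro h
        constructor
        · obtain ⟨h1, h2⟩ := h k (List.mem_cons_self ..)
          refine (altOk_iff hsel).2 ⟨h1, ?_⟩
          intro j hj
          exact h2 j (Or.inl hj)
        · intro a ha
          have hka : k < a := picks_ge ha
          obtain ⟨h1, h2⟩ := h a (List.mem_cons_of_mem _ ha)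
          refine ⟨h1, ?_⟩
          rintro j (hj | ⟨hj, hja⟩)
          · rcases List.mem_append.1 hj with hj | hj
            · exact h2 j (Or.inl hj)
            · simp at hj; subst hj
              exact h2 j (Or.inr ⟨List.mem_cons_self .., hka⟩)
          · exact h2 j (Or.inr ⟨List.mem_cons_of_mem _ hj, hja⟩)
    · rw [ih sel (k+1) hkl' hsel]

-- lookup in a map-over-range list
theorem getD_map_range {α : Type} (f : Nat → α) (d : α) {n k : Nat} (hk : k < n) :
    ((List.range n).map f).getD k d = f k := by
  rw [List.getD_eq_getElem?_getD]
  simp [List.getElem?_map, List.getElem?_range, hk]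

theorem mem_clF {m : List (List Int)} {i x : Nat} :
    x ∈ clF m i ↔ (x = i ∨ (x < m.length ∧ (m.getD i []).getD x 0 = 1)) := by
  unfold clF
  rw [List.mem_cons, mem_nb]

theorem clF_lt {m : List (List Int)} {i x : Nat} (hi : i < m.length) (hx : x ∈ clF m i) :
    x < m.length := by
  rcases mem_clF.1 hx with rfl | ⟨h, -⟩ <;> omega

theorem clF_max {m : List (List Int)} (i : Nat) :
    ∃ d, (clF m i).max? = some d ∧ d ∈ clF m i ∧ ∀ x ∈ clF m i, x ≤ d := by
  cases h : (clF m i).max? with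
  | none => rw [List.max?_eq_none_iff] at h; exact absurd h (by simp [clF])
  | some d =>
    obtain ⟨h1, h2⟩ := List.max?_eq_some_iff.1 h
    exact ⟨d, rfl, h1, h2⟩

theorem mem_stageF {m : List (List Int)} {k : Nat} {c : List Nat} :
    c ∈ stageF m k ↔ ∃ i < m.length, (clF m i).max? = some k ∧ c = clF m i := by
  unfold stageF
  simp only [List.mem_filterMap, List.mem_range, Option.ite_none_right_eq_some,
    Option.some.injEq, beq_iff_eq]
  constructor
  · rintro ⟨i, hi, hmax, rfl⟩
    rw [getD_map_range _ _ hi] at hmax ⊢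
    exact ⟨i, hi, hmax, rfl⟩
  · rintro ⟨i, hi, hmax, rfl⟩
    exact ⟨i, hi, by rw [getD_map_range _ _ hi]; exact hmax, getD_map_range _ _ hi⟩

theorem stageOK_iff {m : List (List Int)} {k : Nat} {t : List Nat} :
    stageOK m k t = true ↔
      ∀ i < m.length, (clF m i).max? = some k → ∃ x ∈ clF m i, x ∈ t := by
  unfold stageOK
  simp only [List.all_eq_true, List.any_eq_true, List.contains_eq_mem, decide_eq_true_iff]
  constructor
  · intro h i hi hmax
    exact h (clF m i) (mem_stageF.2 ⟨i, hi, hmax, rfl⟩)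
  · rintro h c hc
    obtain ⟨i, hi, hmax, rfl⟩ := mem_stageF.1 hc
    exact h i hi hmax

-- staged domination checks, unrolled over the remaining positions
theorem domPrefix_iff (m : List (List Int)) (l : List Int) : ∀ (sel : List Nat) (k : Nat),
    domPrefix m sel k l = true ↔
      ∀ d < l.length, stageOK m (k + d) (sel ++ picks k (l.take (d+1))) = true := by
  induction l with
  | nil => intro sel k; simp [domPrefix]
  | cons b l ih =>
    intro sel k
    simp only [domPrefix]
    have hsplit : ∀ d : Nat, sel ++ picks k ((b :: l).take (d+1+1))
        = (sel ++ picks k [b]) ++ picks (k+1) (l.take (d+1)) := by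
      intro d
      rw [List.take_succ_cons, picks_cons, List.append_assoc]
    have hone : (b :: l).take 1 = [b] := by simp
    split
    case isTrue hb =>
      have hb' : picks k [b] = [k] := by simp [picks, hb]
      rw [Bool.and_eq_true, ih (sel ++ [k]) (k+1)]
      constructor
      · rintro ⟨h0, hr⟩ d hd
        cases d with
        | zero => simpa [hone, hb'] using h0
        | succ d =>
          rw [hsplit d, hb', show k + (d+1) = (k+1) + d by omega]
          exact hr d (by simpa using hd)
      · intro h
        constructor
        · have := h 0 (by simp)
          simpa [hone, hb'] using this
        · intro d hd
          have := h (d+1) (by simp; omega)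
          rw [hsplit d, hb', show k + (d+1) = (k+1) + d by omega] at this
          exact this
    case isFalse hb =>
      have hb' : picks k [b] = [] := by simp [picks, hb]
      rw [Bool.and_eq_true, ih sel (k+1)]
      constructor
      · rintro ⟨h0, hr⟩ d hd
        cases d with
        | zero => simpa [hone, hb'] using h0
        | succ d =>
          rw [hsplit d, hb', List.append_nil]
          rw [show k + (d+1) = (k+1) + d by omega]
          exact hr d (by simpa using hd)
      · intro h
        constructor
        · have := h 0 (by simp)
          simpa [hone, hb'] using this
        · intro d hd
          have := h (d+1) (by simp; omega)
          rw [hsplit d, hb', List.append_nil] at this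
          rw [show k + (d+1) = (k+1) + d by omega] at this
          exact this

theorem mem_picks_take {l : List Int} {t a : Nat} :
    a ∈ picks 0 (l.take t) ↔ (a < t ∧ a ∈ picks 0 l) := by
  rw [mem_picks, mem_picks]
  simp only [Nat.sub_zero, Nat.zero_le, true_and, List.length_take]
  constructor
  · rintro ⟨h1, h2⟩
    refine ⟨by omega, by omega, ?_⟩
    rw [List.getD_eq_getElem?_getD, List.getElem?_take] at h2
    rw [if_pos (by omega)] at h2
    rw [List.getD_eq_getElem?_getD]
    exact h2
  · rintro ⟨h1, h2, h3⟩
    refine ⟨by omega, ?_⟩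
    rw [List.getD_eq_getElem?_getD, List.getElem?_take, if_pos (by omega)]
    rw [List.getD_eq_getElem?_getD] at h3
    exact h3

-- per-line domination bridge
theorem domPrefix_global {m : List (List Int)} {l : List Int} (hlen : l.length = m.length) :
    domPrefix m [] 0 l = true ↔
      ∀ i < m.length, ∃ x ∈ clF m i, x ∈ picks 0 l := by
  rw [domPrefix_iff]
  simp only [List.nil_append, Nat.zero_add]
  constructor
  · intro h i hi
    obtain ⟨d, hd, hdm, hdb⟩ := clF_max (m := m) i
    have hdn : d < m.length := clF_lt hi hdm
    obtain ⟨x, hx, hxp⟩ := (stageOK_iff.1 (h d (by omega))) i hi hd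
    refine ⟨x, hx, ?_⟩
    exact (mem_picks_take.1 hxp).2
  · intro h d hd
    rw [stageOK_iff]
    intro i hi hmax
    obtain ⟨x, hx, hxp⟩ := h i hi
    refine ⟨x, hx, ?_⟩
    rw [mem_picks_take]
    refine ⟨?_, hxp⟩
    have := (List.max?_eq_some_iff.1 hmax).2 x hx
    omega

-- generic fold shapes
theorem foldl_and {α : Type} (p : α → Bool) : ∀ (l : List α) (b : Bool),
    l.foldl (fun r x => r && p x) b = (b && l.all p) := by
  intro l
  induction l with
  | nil => intro b; simp
  | cons x l ih =>
    intro b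
    rw [List.foldl_cons, ih, List.all_cons, ← Bool.and_assoc]

theorem foldl_if_beq_append {α : Type} (P : α → Bool) :
    ∀ (X : List α) (acc : List α),
    X.foldl (fun acc x => if P x == true then acc ++ [x] else acc) acc
      = acc ++ X.filter P := by
  intro X
  induction X with
  | nil => intro acc; simp
  | cons x X ih =>
    intro acc
    rw [List.foldl_cons]
    by_cases h : P x
    · rw [if_pos (by simp [h]), ih, List.filter_cons_of_pos h]; simp
    · rw [if_neg (by simp [h]), ih, List.filter_cons_of_neg (by simp [h])]

theorem foldl_append_flat {α β : Type} (g : α → List β) :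
    ∀ (X : List α) (acc : List β),
    X.foldl (fun a x => a ++ g x) acc = acc ++ X.flatMap g := by
  intro X
  induction X with
  | nil => intro acc; simp
  | cons x X ih => intro acc; simp [List.foldl_cons, ih]

theorem filterMap_flatMap' {α β γ : Type} (f : β → Option γ) (h : α → List β) :
    ∀ (X : List α), (X.flatMap h).filterMap f = X.flatMap (fun x => (h x).filterMap f) := by
  intro X
  induction X with
  | nil => simp
  | cons x X ih => simp [List.flatMap_cons, List.filterMap_append, ih]

theorem flatMap_filterMap {α β γ : Type} (f : α → Option β) (g : β → List γ) :
    ∀ (X : List α), (X.filterMap f).flatMap g = X.flatMap (fun x => ((f x).map g).getD []) := by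
  intro X
  induction X with
  | nil => simp
  | cons x X ih =>
    cases hx : f x <;> simp [List.filterMap_cons, hx, ih]

theorem filter_flatMap' {α β : Type} (p : β → Bool) (h : α → List β) :
    ∀ (X : List α), (X.flatMap h).filter p = X.flatMap (fun x => (h x).filter p) := by
  intro X
  induction X with
  | nil => simp
  | cons x X ih => simp [List.flatMap_cons, List.filter_append, ih]

theorem flatMap_congr' {α β : Type} {g h : α → List β} :
    ∀ (X : List α), (∀ x ∈ X, g x = h x) → X.flatMap g = X.flatMap h := by
  intro X
  induction X with
  | nil => intro _; rfl
  | cons x X ih =>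
    intro hc
    simp only [List.flatMap_cons]
    rw [hc x (List.mem_cons_self ..), ih (fun y hy => hc y (List.mem_cons_of_mem _ hy))]

-- the layered loop of B equals filterMap selOf? over the product lines
theorem layers (m : List (List Int)) : ∀ (k : Nat),
    (List.range k).foldl (stepB m) [[]]
      = (pvProd01 k).filterMap (fun l => selOf? m [] 0 l) := by
  intro k
  induction k with
  | zero => simp [pvProd01, selOf?]
  | succ k ih =>
    rw [List.range_succ, List.foldl_append, ih]
    simp only [List.foldl_cons, List.foldl_nil]
    unfold stepB
    rw [flatMap_filterMap, filter_flatMap']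
    rw [show pvProd01 (k+1) = (pvProd01 k).flatMap (fun l => [l ++ [0], l ++ [1]]) from rfl]
    rw [filterMap_flatMap']
    apply flatMap_congr'
    intro l hl
    have hlen : l.length = k := (prod01_mem hl).1
    rw [List.filterMap_cons, List.filterMap_cons, List.filterMap_nil,
      selOf?_snoc, selOf?_snoc]
    simp only [Nat.zero_add, hlen]
    cases hfl : selOf? m [] 0 l with
    | none => simp
    | some s =>
      simp only [Option.bind_some, Option.map_some, Option.getD_some,
        show ((0:Int) == 1) = false from rfl, show ((1:Int) == 1) = true from rfl,
        if_false, if_true]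
      by_cases hps : stageOK m k s = true
      · by_cases hok : altOk m k s = true
        · by_cases hpk : stageOK m k (s ++ [k]) = true
          · simp [hok, hps, hpk, List.filter_cons]
          · simp [hok, hps, hpk, List.filter_cons]
        · simp [hok, hps, List.filter_cons]
      · by_cases hok : altOk m k s = true
        · by_cases hpk : stageOK m k (s ++ [k]) = true
          · simp [hok, hps, hpk, List.filter_cons]
          · simp [hok, hps, hpk, List.filter_cons]
        · simp [hok, hps, List.filter_cons]

-- selected entries of a 0/1 line, via enumerate (A's extraction step)
theorem extract_eq (l : List Int) : ∀ (k : Nat),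
    (PySem.List.enumerate l (k : Int)).filterMap
        (fun p => if p.2 == 1 then some p.1 else none)
      = (picks k l).map Int.ofNat := by
  induction l with
  | nil => intro k; simp [PySem.List.enumerate_nil, picks]
  | cons b l ih =>
    intro k
    rw [PySem.List.enumerate_cons, List.filterMap_cons]
    have : ((k : Int) + 1) = ((k + 1 : Nat) : Int) := by push_cast; ring
    by_cases hb : b = 1
    · simp only [picks, hb, this, ih (k+1)]
      simp
    · have hb' : (b == 1) = false := by simp [hb]
      simp only [picks, hb', this, ih (k+1)]
      simp [hb]

def entries01 (l : List Int) : Prop := ∀ b ∈ l, b = 0 ∨ b = 1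

-- per-line: A's cnf1 test ↔ B's incremental independence checks
theorem ind1_iff (m : List (List Int)) (l : List Int)
    (hlen : l.length = m.length) (h01 : entries01 l) :
    (((List.range m.length).flatMap (fun i => (List.range m.length).filterMap
        (fun j => if (m.getD i []).getD j 0 == 1 then some (i, j) else none))).all
      (fun d => (l.getD d.1 0 == 0) || (l.getD d.2 0 == 0))) = true
    ↔ okPrefixI m [] 0 l = true := by
  have hmem : ∀ a : Nat, a ∈ picks 0 l ↔ (a < m.length ∧ l.getD a 0 = 1) := by
    intro a
    rw [mem_picks]
    constructor
    · rintro ⟨-, h2, h3⟩; exact ⟨by simpa [hlen] using h2, by simpa using h3⟩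
    · rintro ⟨h1, h2⟩; exact ⟨Nat.zero_le _, by simpa [hlen] using h1, by simpa using h2⟩
  have hval : ∀ a : Nat, a < m.length → (l.getD a 0 = 0 ∨ l.getD a 0 = 1) := by
    intro a ha
    have : l.getD a 0 ∈ l ∨ l.getD a 0 = 0 := by
      rcases Nat.lt_or_ge a l.length with h | h
      · left; rw [List.getD_eq_getElem _ _ (by omega)]; exact List.getElem_mem _
      · right; simp [List.getD_eq_getElem?_getD, List.getElem?_eq_none (by omega)]
    rcases this with h | h
    · exact h01 _ h
    · exact Or.inl h
  rw [okPrefixI_iff m l [] 0 (by omega) (by simp)]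
  simp only [List.all_eq_true, List.mem_flatMap, List.mem_filterMap, List.mem_range,
    List.not_mem_nil, false_or]
  constructor
  · rintro h a ha
    obtain ⟨han, ha1⟩ := hmem a |>.1 ha
    constructor
    · intro hMaa
      have hMaa' : (m.getD a []).getD a 0 = 1 := hMaa
      have := h (a, a) ⟨a, han, a, han, by rw [if_pos (by simp only [hMaa', beq_self_eq_true])]⟩
      simp only [Bool.or_eq_true, beq_iff_eq] at this
      rcases this with h' | h' <;> omega
    · rintro j ⟨hj, hja⟩
      obtain ⟨hjn, hj1⟩ := hmem j |>.1 hj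
      constructor
      · intro hMaj
        have hMaj' : (m.getD a []).getD j 0 = 1 := hMaj
        have := h (a, j) ⟨a, han, j, hjn, by rw [if_pos (by simp only [hMaj', beq_self_eq_true])]⟩
        simp only [Bool.or_eq_true, beq_iff_eq] at this
        rcases this with h' | h' <;> omega
      · intro hMja
        have hMja' : (m.getD j []).getD a 0 = 1 := hMja
        have := h (j, a) ⟨j, hjn, a, han, by rw [if_pos (by simp only [hMja', beq_self_eq_true])]⟩
        simp only [Bool.or_eq_true, beq_iff_eq] at this
        rcases this with h' | h' <;> omega
  · rintro h ⟨i, j⟩ ⟨i', hi', j', hj', hij⟩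
    simp only [Option.ite_none_right_eq_some, Option.some.injEq, Prod.mk.injEq,
      beq_iff_eq] at hij
    obtain ⟨hM, rfl, rfl⟩ := hij
    simp only [Bool.or_eq_true, beq_iff_eq]
    by_contra hcon
    push_neg at hcon
    obtain ⟨hi0, hj0⟩ := hcon
    have hi1 : l.getD i' 0 = 1 := by rcases hval i' hi' with h' | h' <;> omega
    have hj1 : l.getD j' 0 = 1 := by rcases hval j' hj' with h' | h' <;> omega
    have hip : i' ∈ picks 0 l := hmem i' |>.2 ⟨hi', hi1⟩
    have hjp : j' ∈ picks 0 l := hmem j' |>.2 ⟨hj', hj1⟩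
    have hMij : pvM m i' j' = 1 := hM
    rcases Nat.lt_trichotomy i' j' with hlt | heq | hgt
    · exact ((h j' hjp).2 i' ⟨hip, hlt⟩).2 hMij
    · subst heq; exact (h i' hip).1 hMij
    · exact ((h i' hip).2 j' ⟨hjp, hgt⟩).1 hMij

-- per-line: A's domination clauses ↔ B's staged domination checks
theorem ind2_iff (m : List (List Int)) (l : List Int)
    (hlen : l.length = m.length) (h01 : entries01 l) :
    (((List.range m.length).map (fun i => i :: (List.range m.length).filterMap
        (fun j => if (m.getD i []).getD j 0 == 1 then some j else none))).all
      (fun dis => dis.any (fun i => !(l.getD i 0 == 0)))) = true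
    ↔ domPrefix m [] 0 l = true := by
  have hval : ∀ a : Nat, a < m.length → (l.getD a 0 = 0 ∨ l.getD a 0 = 1) := by
    intro a ha
    have : l.getD a 0 ∈ l ∨ l.getD a 0 = 0 := by
      rcases Nat.lt_or_ge a l.length with h | h
      · left; rw [List.getD_eq_getElem _ _ (by omega)]; exact List.getElem_mem _
      · right; simp [List.getD_eq_getElem?_getD, List.getElem?_eq_none (by omega)]
    rcases this with h | h
    · exact h01 _ h
    · exact Or.inl h
  rw [domPrefix_global hlen]
  show ((List.range m.length).map (fun i => clF m i)).all _ = true ↔ _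
  rw [List.all_map]
  simp only [List.all_eq_true, List.mem_range, Function.comp]
  constructor
  · intro h i hi
    have hcl := h i hi
    simp only [List.any_eq_true, Bool.not_eq_true', beq_eq_false_iff_ne, ne_eq] at hcl
    obtain ⟨x, hx, hx0⟩ := hcl
    have hxn : x < m.length := clF_lt hi hx
    refine ⟨x, hx, ?_⟩
    rw [mem_picks]
    refine ⟨Nat.zero_le _, by simpa [hlen] using hxn, ?_⟩
    simp only [Nat.sub_zero]
    rcases hval x hxn with h' | h' <;> omega
  · intro h i hi
    obtain ⟨x, hx, hxp⟩ := h i hi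
    simp only [List.any_eq_true, Bool.not_eq_true', beq_eq_false_iff_ne, ne_eq]
    refine ⟨x, hx, ?_⟩
    obtain ⟨-, -, h3⟩ := mem_picks.1 hxp
    simp only [Nat.sub_zero] at h3
    omega

-- the two per-line tests and A's extraction, named for the assembly
def PA (m : List (List Int)) (l : List Int) : Bool :=
  (((List.range m.length).flatMap (fun i => (List.range m.length).filterMap
      (fun j => if (m.getD i []).getD j 0 == 1 then some (i, j) else none))).all
    (fun d => (l.getD d.1 0 == 0) || (l.getD d.2 0 == 0)))
  && (((List.range m.length).map (fun i => i :: (List.range m.length).filterMap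
      (fun j => if (m.getD i []).getD j 0 == 1 then some j else none))).all
    (fun dis => dis.any (fun i => !(l.getD i 0 == 0))))

def EA (l : List Int) : List Int :=
  (PySem.List.enumerate l 0).filterMap (fun p => if p.2 == 1 then some p.1 else none)

theorem EA_picks (l : List Int) : EA l = (picks 0 l).map Int.ofNat := by
  have h := extract_eq l 0
  simpa [EA] using h

theorem PA_eq (m : List (List Int)) (l : List Int)
    (hlen : l.length = m.length) (h01 : entries01 l) :
    PA m l = okPrefix m [] 0 l := by
  have e1 := Bool.eq_iff_iff.2 (ind1_iff m l hlen h01)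
  have e2 := Bool.eq_iff_iff.2 (ind2_iff m l hlen h01)
  unfold PA
  rw [e1]
  rw [show ((List.range m.length).map (fun i => i :: (List.range m.length).filterMap
      (fun j => if (m.getD i []).getD j 0 == 1 then some j else none))).all
      (fun dis => dis.any (fun i => !(l.getD i 0 == 0))) = _ from e2]
  rw [okPrefix_split]

theorem assemble (m : List (List Int)) :
    ∀ (X : List (List Int)), (∀ l ∈ X, l.length = m.length ∧ entries01 l) →
    (X.filter (PA m)).map EA
      = (X.filterMap (fun l => selOf? m [] 0 l)).map (fun s => s.map Int.ofNat) := by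
  intro X
  induction X with
  | nil => intro _; rfl
  | cons l X ih =>
    intro h
    obtain ⟨hlen, h01⟩ := h l (List.mem_cons_self ..)
    have ihX := ih (fun y hy => h y (List.mem_cons_of_mem _ hy))
    have hPA := PA_eq m l hlen h01
    by_cases hok : okPrefix m [] 0 l = true
    · have hsel : selOf? m [] 0 l = some (picks 0 l) := by
        rw [selOf?_eq, if_pos hok, List.nil_append]
      have hpa : PA m l = true := by rw [hPA, hok]
      rw [List.filterMap_cons_some hsel, List.filter_cons_of_pos hpa,
        List.map_cons, List.map_cons, ihX, EA_picks]
    · have hok' : okPrefix m [] 0 l = false := Bool.eq_false_iff.2 hok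
      have hsel : selOf? m [] 0 l = none := by rw [selOf?_eq, if_neg hok]
      have hpa : PA m l = false := by rw [hPA, hok']
      rw [List.filterMap_cons_none hsel, List.filter_cons_of_neg (by simp [hpa]), ihX]

-- ===== VERDICT (by name: the statement is the Claim_ definition above) =====
theorem graph_cores_spec : Claim_equal_graph_cores := by
  intro m _ _
  unfold Spec_graph_cores
  have hA : graph_cores m = ((pvProd01 m.length).filter (PA m)).map EA := by
    simp only [graph_cores]
    rw [foldl_if_beq_append]
    simp only [foldl_and, Bool.true_and, List.nil_append]
    rfl
  have hB : graph_cores_alt m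
      = ((pvProd01 m.length).filterMap (fun l => selOf? m [] 0 l)).map
          (fun s => s.map Int.ofNat) := by
    simp only [graph_cores_alt]
    refine Eq.trans (congrArg (List.map (fun s => List.map Int.ofNat s))
      (PySem.List.foldl_congr_mem (List.range m.length) _ (stepB m) [[]] ?_)) (by rw [layers])
    intro cur k hk
    have hkn : k < m.length := List.mem_range.1 hk
    simp only [getD_map_range _ _ hkn]
    show (if (stageF m k).isEmpty
        then cur.foldl (fun nxt s => nxt ++ (s :: (if altOk m k s then [s ++ [k]] else []))) []
        else (cur.foldl (fun nxt s => nxt ++ (s :: (if altOk m k s then [s ++ [k]] else []))) []).filter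
          (fun t => (stageF m k).all (fun c => c.any (fun x => t.contains x))))
      = stepB m cur k
    simp only [foldl_append_flat, List.nil_append]
    unfold stepB
    by_cases hE : (stageF m k).isEmpty
    · rw [if_pos hE]
      exact (List.filter_eq_self.2 (fun t _ => by
        simp [stageOK, List.isEmpty_iff.1 hE])).symm
    · rw [if_neg hE]
      rfl
  rw [hA, hB]
  exact assemble m _ (fun l hl => ⟨(prod01_mem hl).1, (prod01_mem hl).2⟩)
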